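-- pv_equiv track=rewrite | github.com/0xntlong/leetcode-and-self-study | python3/hard-solution/3068.py | maximumValueSum
-- ===== SOURCE A (Python) =====
-- from typing import List
--
-- def maximumValueSum(nums: List[int], k: int, edges: List[List[int]]) -> int:
--     total = 0
--     res = []
--     for x in nums:
--         total += x
--         y = x ^ k
--         res.append(y - x)
--     res.sort(reverse = True)
--     for i in range(0, len(res) - 1, 2):
--         if res[i] + res[i + 1] <= 0:
--             break
--         total += res[i] + res[i + 1 ]
--     return total
-- ===== SOURCE B (Python) =====
-- from typing import List
--
-- def maximumValueSum(nums: List[int], k: int, edges: List[List[int]]) -> int: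
--     # One pass (no sort): take max(x, x^k) for every node; if the number of flips is odd,
--     # undo the cheapest choice (the minimal |x^k - x|).
--     total = 0
--     odd = False
--     m = None
--     for x in nums:
--         y = x ^ k
--         if y > x:
--             total += y
--             odd = not odd
--         else:
--             total += x
--         a = y - x if y > x else x - y
--         if m is None or a < m:
--             m = a
--     return total - m if odd else total
-- ===== Notes on version B (the rewrite author's own statement) =====
-- stated objective: alternative
-- what changed: Replaced build-diff-list + sort + greedy paired scan by a single one-pass fold that sums max(x, x^k), tracks the parity of beneficial flips, and the minimum |x^k - x|, subtracting that minimum once if the parity is odd.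
import Mathlib
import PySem

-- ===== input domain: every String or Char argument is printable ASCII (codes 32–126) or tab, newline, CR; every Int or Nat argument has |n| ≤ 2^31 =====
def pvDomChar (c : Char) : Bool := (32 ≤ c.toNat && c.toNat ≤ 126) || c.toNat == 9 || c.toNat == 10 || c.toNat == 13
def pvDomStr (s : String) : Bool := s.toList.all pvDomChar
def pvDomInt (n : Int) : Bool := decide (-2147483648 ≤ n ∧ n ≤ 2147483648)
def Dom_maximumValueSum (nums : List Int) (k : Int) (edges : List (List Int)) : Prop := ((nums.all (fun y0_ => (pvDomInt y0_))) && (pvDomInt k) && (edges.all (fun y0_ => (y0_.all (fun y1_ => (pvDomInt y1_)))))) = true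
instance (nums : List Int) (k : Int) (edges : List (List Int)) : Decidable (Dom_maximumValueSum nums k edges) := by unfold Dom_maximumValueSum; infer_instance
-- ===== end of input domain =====

-- B replaces A's sort + greedy paired scan by one pass tracking flip-parity and the minimal |x^k - x| (alternative algorithm, no sort).


-- ===== PORT A =====
-- A's second loop: 'for i in range(0, len(res) - 1, 2): if res[i] + res[i+1] <= 0: break; total += res[i] + res[i+1]'
-- (range guard 'i < len(res) - 1' is exactly 'i + 1 < res.length', so both indexings are in range)
def mvsLoop (res : List Int) (i : Nat) (total : Int) : Int :=
  if h : i + 1 < res.length then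
    if res[i]'(Nat.lt_of_succ_lt h) + res[i + 1]'h ≤ 0 then total
    else mvsLoop res (i + 2) (total + (res[i]'(Nat.lt_of_succ_lt h) + res[i + 1]'h))
  else total
termination_by res.length - i

def maximumValueSum (nums : List Int) (k : Int) (edges : List (List Int)) : Int :=
  -- first loop: total += x; res.append((x ^ k) - x)
  let st := nums.foldl (fun (st : Int × List Int) x => (st.1 + x, st.2 ++ [PySem.Int.bxor x k - x])) (0, [])
  -- res.sort(reverse=True)
  let res := PySem.List.sorted st.2 (fun d => d) true
  mvsLoop res 0 st.1

-- ===== PORT B =====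
def maximumValueSum_alt (nums : List Int) (k : Int) (edges : List (List Int)) : Int :=
  let st := nums.foldl (fun (st : Int × Bool × Option Int) x =>
    let y := PySem.Int.bxor x k
    let total := if y > x then st.1 + y else st.1 + x
    let odd := if y > x then !st.2.1 else st.2.1
    let a := if y > x then y - x else x - y
    let m := match st.2.2 with
      | none => some a
      | some mm => some (if a < mm then a else mm)
    (total, odd, m)) (0, false, none)
  if st.2.1 then st.1 - st.2.2.getD 0 else st.1

-- ===== PRECONDITION & SPEC =====
def Spec_maximumValueSum (nums : List Int) (k : Int) (edges : List (List Int)) (out : Int) : Prop := out = maximumValueSum_alt nums k edges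
instance (nums : List Int) (k : Int) (edges : List (List Int)) (out : Int) : Decidable (Spec_maximumValueSum nums k edges out) := by unfold Spec_maximumValueSum; infer_instance

-- ===== CLAIM (what is proved, stated in full; the proofs are below) =====
def Claim_equal_maximumValueSum : Prop := ∀ (nums : List Int) (k : Int) (edges : List (List Int)), Dom_maximumValueSum nums k edges → Spec_maximumValueSum nums k edges (maximumValueSum nums k edges)

-- ===== LEMMAS AND PROOFS =====

-- |v| written with the same ite shape B uses
def absd (v : Int) : Int := if 0 < v then v else -v

def sumPos : List Int → Int
  | [] => 0
  | v :: t => (if 0 < v then v else 0) + sumPos t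

def oddb : List Int → Bool
  | [] => false
  | v :: t => xor (decide (0 < v)) (oddb t)

def minO : List Int → Option Int
  | [] => none
  | v :: t => some (match minO t with
      | none => absd v
      | some m => min (absd v) m)

def mergeMin : Option Int → Option Int → Option Int
  | m, none => m
  | none, some b => some b
  | some a, some b => some (min a b)

-- the greedy value A's loop computes, as a function of the sorted diff list
def gval (l : List Int) : Int := mvsLoop l 0 0

theorem mvsLoop_add (res : List Int) (i : Nat) (t : Int) :
    mvsLoop res i t = t + mvsLoop res i 0 := by
  have key : ∀ (n j : Nat) (u : Int), res.length - j ≤ n → mvsLoop res j u = u + mvsLoop res j 0 := by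
    intro n
    induction n with
    | zero =>
      intro j u h
      rw [mvsLoop, mvsLoop]
      have hc : ¬ (j + 1 < res.length) := by omega
      rw [dif_neg hc, dif_neg hc]; ring
    | succ n ih =>
      intro j u h
      rw [mvsLoop, mvsLoop]
      by_cases hc : j + 1 < res.length
      · rw [dif_pos hc, dif_pos hc]
        split_ifs with hs
        · ring
        · rw [ih (j + 2) (u + _) (by omega), ih (j + 2) (0 + _) (by omega)]; ring
      · rw [dif_neg hc, dif_neg hc]; ring
  exact key (res.length - i) i t le_rfl

theorem mvsLoop_shift (l : List Int) (x y : Int) (i : Nat) (t : Int) :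
    mvsLoop (x :: y :: l) (i + 2) t = mvsLoop l i t := by
  have key : ∀ (n j : Nat) (u : Int), l.length - j ≤ n → mvsLoop (x :: y :: l) (j + 2) u = mvsLoop l j u := by
    intro n
    induction n with
    | zero =>
      intro j u h
      rw [mvsLoop, mvsLoop]
      have hc : ¬ (j + 1 < l.length) := by omega
      have hc' : ¬ (j + 2 + 1 < (x :: y :: l).length) := by simp; omega
      rw [dif_neg hc, dif_neg hc']
    | succ n ih =>
      intro j u h
      rw [mvsLoop, mvsLoop]
      by_cases hc : j + 1 < l.length
      · have hc' : j + 2 + 1 < (x :: y :: l).length := by simp; omega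
        rw [dif_pos hc, dif_pos hc']
        simp only [List.getElem_cons_succ]
        split_ifs with hs
        · rfl
        · exact ih (j + 2) _ (by omega)
      · have hc' : ¬ (j + 2 + 1 < (x :: y :: l).length) := by simp; omega
        rw [dif_neg hc, dif_neg hc']
  exact key (l.length - i) i t le_rfl

theorem gval_cons_cons (x y : Int) (t : List Int) :
    gval (x :: y :: t) = if x + y ≤ 0 then 0 else (x + y) + gval t := by
  unfold gval
  rw [mvsLoop]
  have hc : 0 + 1 < (x :: y :: t).length := by simp
  rw [dif_pos hc]
  simp only [List.getElem_cons_zero, List.getElem_cons_succ]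
  split_ifs with hs
  · rfl
  · rw [show (0 : Nat) + 2 = 0 + 2 from rfl, mvsLoop_shift t x y 0 _, mvsLoop_add]
    ring

theorem sumPos_eq_zero {t : List Int} (h : ∀ v ∈ t, v ≤ 0) : sumPos t = 0 := by
  induction t with
  | nil => rfl
  | cons v t ih =>
    have hv := h v (List.mem_cons_self ..)
    simp only [sumPos, if_neg (by omega : ¬ (0 : Int) < v),
      ih (fun w hw => h w (List.mem_cons_of_mem _ hw)), add_zero]

theorem oddb_false {t : List Int} (h : ∀ v ∈ t, v ≤ 0) : oddb t = false := by
  induction t with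
  | nil => rfl
  | cons v t ih =>
    have hv := h v (List.mem_cons_self ..)
    simp only [oddb, ih (fun w hw => h w (List.mem_cons_of_mem _ hw)),
      decide_eq_false (by omega : ¬ (0 : Int) < v), Bool.xor_false]

theorem oddb_exists_pos {t : List Int} (h : oddb t = true) : ∃ p ∈ t, 0 < p := by
  by_contra hc
  push_neg at hc
  rw [oddb_false (fun v hv => by have := hc v hv; omega)] at h
  exact Bool.false_ne_true h

theorem minO_le_mem {t : List Int} {p : Int} (hp : p ∈ t) {m : Int} (hm : minO t = some m) :
    m ≤ absd p := by
  induction t generalizing m with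
  | nil => exact absurd hp (List.not_mem_nil)
  | cons v t ih =>
    simp only [minO] at hm
    rcases List.mem_cons.mp hp with rfl | hp'
    · cases ht : minO t with
      | none => simp [ht] at hm; omega
      | some m' => rw [ht] at hm; simp only [Option.some.injEq] at hm; subst hm; exact min_le_left _ _
    · cases ht : minO t with
      | none =>
        -- t must be nonempty since p ∈ t, but minO t = none means t = []
        cases t with
        | nil => exact absurd hp' (List.not_mem_nil)
        | cons w s => simp [minO] at ht
      | some m' =>
        rw [ht] at hm; simp only [Option.some.injEq] at hm; subst hm
        exact le_trans (min_le_right _ _) (ih hp' ht)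

theorem minO_ge {t : List Int} {c : Int} (h : ∀ v ∈ t, c ≤ absd v) {m : Int}
    (hm : minO t = some m) : c ≤ m := by
  induction t generalizing m with
  | nil => simp [minO] at hm
  | cons v t ih =>
    have hv := h v (List.mem_cons_self ..)
    cases ht : minO t with
    | none => simp only [minO, ht, Option.some.injEq] at hm; omega
    | some m' =>
      simp only [minO, ht, Option.some.injEq] at hm; subst hm
      exact le_min hv (ih (fun w hw => h w (List.mem_cons_of_mem _ hw)) ht)

theorem gval_nil : gval [] = 0 := by
  unfold gval; rw [mvsLoop]; rw [dif_neg (by simp)]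

theorem gval_singleton (x : Int) : gval [x] = 0 := by
  unfold gval; rw [mvsLoop]; rw [dif_neg (by simp)]

-- the heart: on a descending list, A's greedy equals B's parity formula
theorem minO_getD_none {t : List Int} (h : minO t = none) (x y : Int) :
    (minO (x :: y :: t)).getD 0 = min (absd x) (absd y) := by
  simp [minO, h]

theorem minO_getD_some {t : List Int} {mt : Int} (h : minO t = some mt) (x y : Int) :
    (minO (x :: y :: t)).getD 0 = min (absd x) (min (absd y) mt) := by
  simp [minO, h]

theorem gval_sorted : ∀ (n : Nat) (l : List Int), l.length ≤ n →
    l.Pairwise (fun a b => b ≤ a) →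
    gval l = sumPos l - (if oddb l then (minO l).getD 0 else 0) := by
  intro n
  induction n with
  | zero =>
    intro l h _
    have : l = [] := List.eq_nil_of_length_eq_zero (by omega)
    subst this
    simp [gval_nil, sumPos, oddb]
  | succ n ih =>
    intro l h hp
    match l with
    | [] => simp [gval_nil, sumPos, oddb]
    | [x] =>
      rw [gval_singleton]
      simp only [sumPos, oddb, minO, Bool.xor_false, Option.getD_some, add_zero]
      rcases lt_or_ge 0 x with hx | hx
      · rw [if_pos hx, decide_eq_true hx, if_pos rfl]
        unfold absd
        rw [if_pos hx]; ring
      · rw [if_neg (by omega), decide_eq_false (by omega), if_neg (by simp)]; ring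
    | x :: y :: t =>
      have hxy : y ≤ x := (List.pairwise_cons.mp hp).1 y (List.mem_cons_self ..)
      have hyt : ∀ v ∈ t, v ≤ y :=
        (List.pairwise_cons.mp (List.pairwise_cons.mp hp).2).1
      have hpt : t.Pairwise (fun a b => b ≤ a) :=
        (List.pairwise_cons.mp (List.pairwise_cons.mp hp).2).2
      have iht := ih t (by simp at h; omega) hpt
      rw [gval_cons_cons, iht]
      by_cases hy : 0 < y
      · have hx : 0 < x := by omega
        have hax : absd x = x := by unfold absd; rw [if_pos hx]
        have hay : absd y = y := by unfold absd; rw [if_pos hy]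
        rw [if_neg (by omega : ¬ (x + y ≤ 0))]
        simp only [sumPos, oddb, decide_eq_true hx, decide_eq_true hy,
          Bool.true_xor, Bool.not_not, if_pos hx, if_pos hy]
        cases hot : oddb t with
        | false =>
          rw [if_neg (by simp), if_neg (by simp)]; ring
        | true =>
          obtain ⟨p, hpmem, hppos⟩ := oddb_exists_pos hot
          have hne : ∃ mt, minO t = some mt := by
            cases t with
            | nil => exact absurd hpmem List.not_mem_nil
            | cons w s => exact ⟨_, rfl⟩
          obtain ⟨mt, e⟩ := hne
          have hle : mt ≤ absd p := minO_le_mem hpmem e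
          have hap : absd p = p := by unfold absd; rw [if_pos hppos]
          have hpy : p ≤ y := hyt p hpmem
          rw [minO_getD_some e x y, e, if_pos rfl, if_pos rfl, hax, hay]
          simp only [Option.getD_some]
          have hm : min x (min y mt) = mt := by
            rw [min_def, min_def]; split_ifs <;> omega
          rw [hm]; ring
      · have hall : ∀ v ∈ t, v ≤ 0 := fun v hv => by have := hyt v hv; omega
        have habs : ∀ v ∈ t, -y ≤ absd v := fun v hv => by
          have := hyt v hv; unfold absd; split_ifs <;> omega
        have hay : absd y = -y := by unfold absd; rw [if_neg (by omega)]
        simp only [sumPos, oddb, sumPos_eq_zero hall, oddb_false hall,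
          decide_eq_false (by omega : ¬ (0 : Int) < y), if_neg hy,
          Bool.xor_false, if_neg (Bool.false_ne_true), sub_zero, add_zero]
        by_cases hx : 0 < x
        · have hax : absd x = x := by unfold absd; rw [if_pos hx]
          simp only [decide_eq_true hx, if_pos hx, Bool.true_xor, Bool.not_false]
          cases e : minO t with
          | none =>
            rw [minO_getD_none e x y, if_pos trivial, hax, hay, min_def]
            split_ifs <;> omega
          | some mt =>
            have hge : -y ≤ mt := minO_ge habs e
            rw [minO_getD_some e x y, if_pos trivial, hax, hay, min_def, min_def]
            split_ifs <;> omega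
        · simp only [decide_eq_false hx, if_neg hx, Bool.false_xor,
            if_neg (Bool.false_ne_true), if_pos (by omega : x + y ≤ 0)]
          ring

-- permutation invariance of B's three statistics
theorem stats_perm {l l' : List Int} (h : l.Perm l') :
    sumPos l = sumPos l' ∧ oddb l = oddb l' ∧ minO l = minO l' := by
  induction h with
  | nil => exact ⟨rfl, rfl, rfl⟩
  | cons v _ ih =>
    refine ⟨by simp [sumPos, ih.1], by simp [oddb, ih.2.1], ?_⟩
    simp only [minO, ih.2.2]
  | swap a b t =>
    refine ⟨by simp [sumPos]; ring, by simp [oddb, Bool.xor_left_comm], ?_⟩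
    simp only [minO]
    cases minO t with
    | none => simp [min_comm]
    | some m => simp [min_left_comm]
  | trans _ _ ih1 ih2 =>
    exact ⟨ih1.1.trans ih2.1, ih1.2.1.trans ih2.2.1, ih1.2.2.trans ih2.2.2⟩

-- A's first loop
theorem foldA (k : Int) : ∀ (nums : List Int) (t : Int) (r : List Int),
    nums.foldl (fun (st : Int × List Int) x => (st.1 + x, st.2 ++ [PySem.Int.bxor x k - x])) (t, r)
      = (t + nums.sum, r ++ nums.map (fun x => PySem.Int.bxor x k - x)) := by
  intro nums
  induction nums with
  | nil => intro t r; simp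
  | cons x rest ih =>
    intro t r
    simp only [List.foldl_cons, ih, List.map_cons, List.sum_cons, List.append_assoc,
      List.singleton_append]
    simp only [Prod.mk.injEq]
    exact ⟨by ring, trivial⟩

-- B's loop
theorem foldB (k : Int) : ∀ (nums : List Int) (t : Int) (o : Bool) (m : Option Int),
    nums.foldl (fun (st : Int × Bool × Option Int) x =>
      let y := PySem.Int.bxor x k
      let total := if y > x then st.1 + y else st.1 + x
      let odd := if y > x then !st.2.1 else st.2.1
      let a := if y > x then y - x else x - y
      let mv := match st.2.2 with
        | none => some a
        | some mm => some (if a < mm then a else mm)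
      (total, odd, mv)) (t, o, m)
      = (t + nums.sum + sumPos (nums.map (fun x => PySem.Int.bxor x k - x)),
         xor o (oddb (nums.map (fun x => PySem.Int.bxor x k - x))),
         mergeMin m (minO (nums.map (fun x => PySem.Int.bxor x k - x)))) := by
  intro nums
  induction nums with
  | nil =>
    intro t o m
    simp only [List.foldl_nil, List.map_nil, List.sum_nil, sumPos, oddb, minO]
    refine Prod.ext (by ring) (Prod.ext (by simp) ?_)
    cases m <;> rfl
  | cons x rest ih =>
    intro t o m
    simp only [List.foldl_cons, ih, List.map_cons, List.sum_cons, sumPos, oddb, minO]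
    have hx : PySem.Int.bxor x k > x ↔ 0 < PySem.Int.bxor x k - x := by omega
    refine Prod.ext ?_ (Prod.ext ?_ ?_)
    · simp only []
      split_ifs with h1 h2 h2 <;> simp at * <;> omega
    · simp only []
      split_ifs with h1
      · rw [decide_eq_true (hx.mp h1)]; cases o <;> simp
      · rw [decide_eq_false (fun hp => h1 (hx.mpr hp))]; simp
    · simp only []
      have ha : (if PySem.Int.bxor x k > x then PySem.Int.bxor x k - x else x - PySem.Int.bxor x k)
          = absd (PySem.Int.bxor x k - x) := by
        unfold absd; split_ifs with h1 h2 h2 <;> omega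
      rw [ha]
      have e1 : ∀ a b : Int, (if a < b then a else b) = min a b := by
        intro a b; rw [min_def]; split_ifs <;> omega
      cases m with
      | none => cases hmt : minO (rest.map (fun x => PySem.Int.bxor x k - x)) <;> simp [mergeMin]
      | some mm =>
        cases hmt : minO (rest.map (fun x => PySem.Int.bxor x k - x)) with
        | none =>
          simp only [mergeMin, Option.some.injEq, e1]
          exact min_comm _ _
        | some m' =>
          simp only [mergeMin, Option.some.injEq, e1]
          rw [min_assoc, min_left_comm]

theorem mergeMin_none (z : Option Int) : mergeMin none z = z := by
  cases z <;> rfl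

-- ===== VERDICT (by name: the statement is the Claim_ definition above) =====
theorem maximumValueSum_spec : Claim_equal_maximumValueSum := by
  intro nums k edges _
  unfold Spec_maximumValueSum
  simp only [maximumValueSum, maximumValueSum_alt]
  rw [foldA k nums 0 [], foldB k nums 0 false none]
  simp only [zero_add, List.nil_append, Bool.false_xor, mergeMin_none]
  set D := nums.map (fun x => PySem.Int.bxor x k - x) with hD
  set sD := PySem.List.sorted D (fun d => d) true with hsD
  have hperm : sD.Perm D := PySem.List.sorted_perm ..
  have hpair : sD.Pairwise (fun a b => b ≤ a) := PySem.List.sorted_pairwise_rev ..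
  have hg := gval_sorted sD.length sD le_rfl hpair
  obtain ⟨h1, h2, h3⟩ := stats_perm hperm
  rw [show mvsLoop sD 0 nums.sum = nums.sum + gval sD from mvsLoop_add sD 0 nums.sum,
    hg, h1, h2, h3]
  cases oddb D <;> simp <;> ring
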